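-- pv_equiv track=rewrite | github.com/Lavanya573/file-parser-api | Downloads/python web dev/Training/Week -1 Assignment/3.MUSIC LIBRARY MANAGER.py | create_playlist
-- ===== SOURCE A (Python) =====
-- def create_playlist(library, song_selections):
--     playlist = []
--     for album_title, song_title in song_selections:
--         if album_title in library:
--             _, _, songs = library[album_title]
--             if song_title in songs:
--                 playlist.append(song_title)
--     return playlist
-- ===== SOURCE B (Python) =====
-- def create_playlist(library, song_selections):
--     valid = set()
--     for album_title, (_artist, _year, songs) in library.items():
--         for song in songs:
--             valid.add((album_title, song))
--     return [song for album, song in song_selections if (album, song) in valid]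
-- ===== Notes on version B (the rewrite author's own statement) =====
-- stated objective: alternative
-- what changed: B precomputes one set of all valid (album, song) pairs by iterating the whole library once, then produces the playlist as a single flat filter of the selections against that set, replacing A's per-selection two-level dict lookup and inner song-list scan.
import Mathlib
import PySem

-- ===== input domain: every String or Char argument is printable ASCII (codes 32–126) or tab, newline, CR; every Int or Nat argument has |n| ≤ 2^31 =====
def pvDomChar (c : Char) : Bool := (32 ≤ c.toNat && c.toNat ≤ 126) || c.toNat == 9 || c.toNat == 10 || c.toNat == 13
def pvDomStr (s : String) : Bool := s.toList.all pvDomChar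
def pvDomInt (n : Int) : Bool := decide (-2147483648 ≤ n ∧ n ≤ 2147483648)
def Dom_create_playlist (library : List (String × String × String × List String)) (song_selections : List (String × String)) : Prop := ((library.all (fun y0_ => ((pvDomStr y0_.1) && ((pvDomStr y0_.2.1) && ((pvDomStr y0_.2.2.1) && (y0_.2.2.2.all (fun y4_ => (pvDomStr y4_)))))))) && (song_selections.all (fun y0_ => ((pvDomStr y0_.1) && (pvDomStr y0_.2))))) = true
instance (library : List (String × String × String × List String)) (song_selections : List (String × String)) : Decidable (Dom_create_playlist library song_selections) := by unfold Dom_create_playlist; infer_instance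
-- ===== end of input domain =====

-- B builds one set of all valid (album, song) pairs from the whole library, then filters
-- the selections against it in a single flat pass (objective: alternative decomposition).

-- ===== PORT A =====
def create_playlist (library : List (String × String × String × List String)) (song_selections : List (String × String)) : List String :=
  song_selections.foldl (fun playlist sel =>
    match library.find? (fun e => e.1 == sel.1) with
    | some (_, _, _, songs) => if songs.contains sel.2 then playlist ++ [sel.2] else playlist
    | none => playlist) []

-- ===== PORT B =====
-- the precomputed set of all valid (album_title, song_title) pairs
def pvValidPairs (library : List (String × String × String × List String)) : PySem.Set (String × String) :=
  library.foldl (fun s e => e.2.2.2.foldl (fun s song => PySem.Set.add s (e.1, song)) s) PySem.Set.empty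

def create_playlist_alt (library : List (String × String × String × List String)) (song_selections : List (String × String)) : List String :=
  (song_selections.filter (fun sel => PySem.Set.contains (pvValidPairs library) sel)).map (·.2)

-- ===== PRECONDITION & SPEC =====
-- Pre_ excludes association lists with duplicate album titles: a Python dict cannot contain
-- duplicate keys, so such lists represent no Python input; on them first-match lookup (A's port)
-- and a whole-library index (B's port) legitimately differ.
def Pre_create_playlist (library : List (String × String × String × List String)) (song_selections : List (String × String)) : Prop :=
  (library.map (·.1)).Nodup

instance (library : List (String × String × String × List String)) (song_selections : List (String × String)) : Decidable (Pre_create_playlist library song_selections) := by unfold Pre_create_playlist; infer_instance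

def pvWitness_create_playlist : (List (String × String × String × List String)) × (List (String × String)) :=
  ([("a", "art", "2020", ["s1", "s2"]), ("b", "art2", "2021", ["s2"])], [("a", "s1"), ("b", "s3"), ("a", "s2")])

def Spec_create_playlist (library : List (String × String × String × List String)) (song_selections : List (String × String)) (out : List String) : Prop := out = create_playlist_alt library song_selections
instance (library : List (String × String × String × List String)) (song_selections : List (String × String)) (out : List String) : Decidable (Spec_create_playlist library song_selections out) := by unfold Spec_create_playlist; infer_instance

-- ===== CLAIM (what is proved, stated in full; the proofs are below) =====
def Claim_equal_create_playlist : Prop := ∀ (library : List (String × String × String × List String)) (song_selections : List (String × String)), Dom_create_playlist library song_selections → Pre_create_playlist library song_selections → Spec_create_playlist library song_selections (create_playlist library song_selections)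

-- ===== LEMMAS AND PROOFS =====

-- membership in the precomputed pair set
lemma mem_pvValidPairs (library : List (String × String × String × List String)) (y : String × String) :
    y ∈ pvValidPairs library ↔ ∃ e ∈ library, e.1 = y.1 ∧ y.2 ∈ e.2.2.2 := by
  unfold pvValidPairs
  suffices h : ∀ (l : List (String × String × String × List String)) (s : PySem.Set (String × String)),
      y ∈ l.foldl (fun s e => e.2.2.2.foldl (fun s song => PySem.Set.add s (e.1, song)) s) s ↔
      y ∈ s ∨ ∃ e ∈ l, e.1 = y.1 ∧ y.2 ∈ e.2.2.2 by
    simpa [PySem.Set.empty] using h library PySem.Set.empty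
  intro l
  induction l with
  | nil => simp
  | cons e rest ih =>
    intro s
    simp only [List.foldl_cons, ih, PySem.Set.mem_foldl_add (f := fun song => (e.1, song))]
    constructor
    · rintro (⟨h | ⟨b, hb, rfl⟩⟩ | h)
      · exact Or.inl h
      · exact Or.inr ⟨e, List.mem_cons_self .., rfl, hb⟩
      · obtain ⟨e', he', h1, h2⟩ := h
        exact Or.inr ⟨e', List.mem_cons_of_mem _ he', h1, h2⟩
    · rintro (h | ⟨e', he', h1, h2⟩)
      · exact Or.inl (Or.inl h)
      · rcases List.mem_cons.mp he' with rfl | he'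
        · refine Or.inl (Or.inr ⟨y.2, h2, ?_⟩)
          rw [h1]
        · exact Or.inr ⟨e', he', h1, h2⟩

-- A's per-selection condition agrees with membership in the precomputed set, given unique album titles
lemma condA_eq (library : List (String × String × String × List String))
    (hnd : (library.map (·.1)).Nodup) (sel : String × String) :
    (match library.find? (fun e => e.1 == sel.1) with
     | some e => e.2.2.2.contains sel.2
     | none => false) = PySem.Set.contains (pvValidPairs library) sel := by
  rcases hfind : library.find? (fun e => e.1 == sel.1) with _ | e
  · simp only [hfind]
    symm
    rw [Bool.eq_false_iff]
    intro hc
    obtain ⟨e, he, h1, _⟩ := (mem_pvValidPairs library sel).mp ((PySem.Set.contains_iff _ _).mp hc)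
    have := List.find?_eq_none.mp hfind e he
    simp [h1] at this
  · have hmem := List.mem_of_find?_eq_some hfind
    have hkey : e.1 = sel.1 := by
      have := List.find?_some hfind
      simpa using this
    simp only [hfind]
    by_cases hs : sel.2 ∈ e.2.2.2
    · rw [List.contains_iff_mem.mpr hs]
      symm
      exact (PySem.Set.contains_iff _ _).mpr ((mem_pvValidPairs library sel).mpr ⟨e, hmem, hkey, hs⟩)
    · have h1 : e.2.2.2.contains sel.2 = false := by
        simp [hs]
      rw [h1]
      symm
      rw [Bool.eq_false_iff]
      intro hc
      obtain ⟨e', he', hk', hs'⟩ := (mem_pvValidPairs library sel).mp ((PySem.Set.contains_iff _ _).mp hc)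
      have heq : e' = e := by
        have h2 : e'.1 = e.1 := by rw [hk', hkey]
        exact List.inj_on_of_nodup_map hnd he' hmem (by simpa using h2)
      exact hs (heq ▸ hs')

-- A's fold equals filter-then-map
lemma foldl_eq_filter_map (library : List (String × String × String × List String))
    (hnd : (library.map (·.1)).Nodup) (sels : List (String × String)) (acc : List String) :
    sels.foldl (fun playlist sel =>
      match library.find? (fun e => e.1 == sel.1) with
      | some (_, _, _, songs) => if songs.contains sel.2 then playlist ++ [sel.2] else playlist
      | none => playlist) acc
    = acc ++ (sels.filter (fun sel => PySem.Set.contains (pvValidPairs library) sel)).map (·.2) := by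
  induction sels generalizing acc with
  | nil => simp
  | cons sel rest ih =>
    have hc := condA_eq library hnd sel
    simp only [List.foldl_cons, List.filter_cons, ← hc]
    rcases hfind : library.find? (fun e => e.1 == sel.1) with _ | ⟨a, b, c, songs⟩ <;>
      simp only [hfind]
    · rw [if_neg (by simp)]
      exact ih acc
    · by_cases hs : songs.contains sel.2 = true
      · rw [hs, if_pos rfl, ih (acc ++ [sel.2])]
        simp
      · rw [Bool.not_eq_true] at hs
        rw [hs, if_neg (by simp)]
        exact ih acc

-- ===== VERDICT (by name: the statement is the Claim_ definition above) =====
theorem create_playlist_spec : Claim_equal_create_playlist := by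
  intro library sels _ hpre
  unfold Spec_create_playlist create_playlist create_playlist_alt
  simpa using foldl_eq_filter_map library hpre sels []
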